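-- pv_equiv track=rewrite | github.com/chengolivia/community_services_llm | backend/app/submodules.py | deduplicate_resources
-- ===== SOURCE A (Python) =====
-- def deduplicate_resources(resources: list) -> list:
--     """
--     Remove duplicate resources from list.
--
--     Args:
--         resources: List of resource strings
--
--     Returns:
--         Deduplicated list of resources
--     """
--     all_lines = "\n".join(resources).split("\n")
--     seen_resources = set()
--     unique_lines = []
--
--     idx = 0
--     while idx < len(all_lines):
--         line = all_lines[idx]
--
--         # Found a new resource header
--         if "Resource:" in line and line not in seen_resources:
--             seen_resources.add(line)
--             unique_lines.append(line)
--             idx += 1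
--
--             # Include continuation lines
--             while idx < len(all_lines) and "Resource:" not in all_lines[idx]:
--                 unique_lines.append(all_lines[idx])
--                 idx += 1
--
--         # Skip duplicate resource
--         elif line in seen_resources:
--             idx += 1
--             while idx < len(all_lines) and "Resource:" not in all_lines[idx]:
--                 idx += 1
--
--         # Skip non-resource line
--         else:
--             idx += 1
--
--     return unique_lines
-- ===== SOURCE B (Python) =====
-- def deduplicate_resources(resources: list) -> list:
--     """Remove duplicate resource blocks, keyed on the 'Resource:' header line."""
--     blocks = []
--     for line in "\n".join(resources).split("\n"):
--         if "Resource:" in line: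
--             blocks.append([line])
--         elif blocks:
--             blocks[-1].append(line)
--     seen = set()
--     result = []
--     for block in blocks:
--         if block[0] not in seen:
--             seen.add(block[0])
--             result.extend(block)
--     return result
-- ===== Notes on version B (the rewrite author's own statement) =====
-- stated objective: simpler
-- what changed: B first segments the flattened lines into header-led blocks in one pass, then deduplicates whole blocks by their header line with a seen set, replacing A's manual idx/nested-while state machine.
import Mathlib
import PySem

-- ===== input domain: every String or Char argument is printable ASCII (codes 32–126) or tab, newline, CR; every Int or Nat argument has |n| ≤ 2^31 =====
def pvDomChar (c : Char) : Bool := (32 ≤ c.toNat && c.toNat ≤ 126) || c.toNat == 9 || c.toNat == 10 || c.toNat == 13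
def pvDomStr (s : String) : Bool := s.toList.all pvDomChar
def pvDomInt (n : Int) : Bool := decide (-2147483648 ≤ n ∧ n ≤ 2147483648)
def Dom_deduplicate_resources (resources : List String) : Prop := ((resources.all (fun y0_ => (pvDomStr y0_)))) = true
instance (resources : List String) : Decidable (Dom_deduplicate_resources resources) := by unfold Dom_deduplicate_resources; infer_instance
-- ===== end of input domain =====

-- B replaces A's manual idx/nested-while dedup state machine by a two-phase pass
-- (segment the flattened lines into header-led blocks, then dedup whole blocks by
-- their header line); objective: simpler.


-- ===== PORT A =====
-- inner while of the keep branch: collect continuation lines (no "Resource:"),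
-- returning (collected lines, remaining lines)
def pvTakeCont : List String → List String × List String
  | [] => ([], [])
  | l :: rest =>
    if PySem.Str.isIn "Resource:" l then ([], l :: rest)
    else
      let p := pvTakeCont rest
      (l :: p.1, p.2)

theorem pvTakeCont_len (xs : List String) : (pvTakeCont xs).2.length ≤ xs.length := by
  induction xs with
  | nil => simp [pvTakeCont]
  | cons l rest ih =>
    simp only [pvTakeCont]
    split
    · simp
    · simpa using Nat.le_succ_of_le ih

-- inner while of the skip branch: drop continuation lines
def pvSkipCont : List String → List String
  | [] => []
  | l :: rest => if PySem.Str.isIn "Resource:" l then l :: rest else pvSkipCont rest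

theorem pvSkipCont_len (xs : List String) : (pvSkipCont xs).length ≤ xs.length := by
  induction xs with
  | nil => simp [pvSkipCont]
  | cons l rest ih =>
    simp only [pvSkipCont]
    split
    · simp
    · exact Nat.le_succ_of_le ih

-- A's outer while over all_lines; appends to unique_lines become the returned list
def pvALoop : List String → PySem.Set String → List String
  | [], _ => []
  | line :: rest, seen =>
    if PySem.Str.isIn "Resource:" line && !(seen.contains line) then
      let p := pvTakeCont rest
      line :: (p.1 ++ pvALoop p.2 (seen.add line))
    else if seen.contains line then
      pvALoop (pvSkipCont rest) seen
    else
      pvALoop rest seen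
termination_by lines _ => lines.length
decreasing_by
  · exact Nat.lt_succ_of_le (pvTakeCont_len rest)
  · exact Nat.lt_succ_of_le (pvSkipCont_len rest)
  · exact Nat.lt_succ_self _

def deduplicate_resources (resources : List String) : List String :=
  pvALoop ((PySem.Str.split? (PySem.Str.join "\n" resources) "\n").getD [])
    PySem.Set.empty

-- ===== PORT B =====
-- phase 1: segment the lines into blocks; cur is the block currently being built
def pvSegment : List String → Option (List String) → List (List String)
  | [], none => []
  | [], some b => [b]
  | l :: rest, cur =>
    if PySem.Str.isIn "Resource:" l then
      match cur with
      | none => pvSegment rest (some [l])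
      | some b => b :: pvSegment rest (some [l])
    else
      match cur with
      | none => pvSegment rest none          -- line before any header: dropped
      | some b => pvSegment rest (some (b ++ [l]))

-- phase 2: keep a block iff its header line (block[0]) is unseen
def pvDedupBlocks : List (List String) → PySem.Set String → List String
  | [], _ => []
  | b :: rest, seen =>
    match b with
    | [] => pvDedupBlocks rest seen          -- unreachable: blocks are nonempty
    | h :: _ =>
      if seen.contains h then pvDedupBlocks rest seen
      else b ++ pvDedupBlocks rest (seen.add h)

def deduplicate_resources_alt (resources : List String) : List String :=
  pvDedupBlocks
    (pvSegment ((PySem.Str.split? (PySem.Str.join "\n" resources) "\n").getD []) none)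
    PySem.Set.empty

-- ===== PRECONDITION & SPEC =====
def Spec_deduplicate_resources (resources : List String) (out : List String) : Prop := out = deduplicate_resources_alt resources
instance (resources : List String) (out : List String) : Decidable (Spec_deduplicate_resources resources out) := by unfold Spec_deduplicate_resources; infer_instance

-- ===== CLAIM (what is proved, stated in full; the proofs are below) =====
def Claim_equal_deduplicate_resources : Prop := ∀ (resources : List String), Dom_deduplicate_resources resources → Spec_deduplicate_resources resources (deduplicate_resources resources)

-- ===== LEMMAS AND PROOFS =====

-- a header line opens a fresh block
theorem pvSegment_none_cons_of_hdr (l : String) (rest : List String)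
    (h : PySem.Str.isIn "Resource:" l = true) :
    pvSegment (l :: rest) none = pvSegment rest (some [l]) := by
  simp only [pvSegment]
  rw [if_pos h]

-- a non-header line with no open block is dropped
theorem pvSegment_none_cons_of_not_hdr (l : String) (rest : List String)
    (h : ¬ PySem.Str.isIn "Resource:" l = true) :
    pvSegment (l :: rest) none = pvSegment rest none := by
  simp only [pvSegment]
  rw [if_neg h]

-- segmenting with an open block b gathers exactly the continuation lines into b
theorem pvSegment_some (xs : List String) (b : List String) :
    pvSegment xs (some b)
      = (b ++ (pvTakeCont xs).1) :: pvSegment (pvTakeCont xs).2 none := by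
  induction xs generalizing b with
  | nil => simp [pvSegment, pvTakeCont]
  | cons l rest ih =>
    simp only [pvSegment, pvTakeCont]
    by_cases h : PySem.Str.isIn "Resource:" l = true
    · rw [if_pos h, if_pos h]
      rw [pvSegment_none_cons_of_hdr l rest h]
      simp
    · rw [if_neg h, if_neg h, ih (b ++ [l])]
      simp

theorem pvSkipCont_eq (xs : List String) : pvSkipCont xs = (pvTakeCont xs).2 := by
  induction xs with
  | nil => simp [pvSkipCont, pvTakeCont]
  | cons l rest ih =>
    simp only [pvSkipCont, pvTakeCont]
    split <;> simp [ih]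

-- main invariant: as long as every seen element is a header line,
-- A's state machine equals B's segment-then-dedup
theorem pv_main (n : ℕ) : ∀ (xs : List String) (seen : PySem.Set String),
    xs.length ≤ n →
    (∀ s ∈ seen, PySem.Str.isIn "Resource:" s = true) →
    pvALoop xs seen = pvDedupBlocks (pvSegment xs none) seen := by
  induction n with
  | zero =>
    intro xs seen hlen _
    have : xs = [] := List.length_eq_zero_iff.mp (Nat.le_zero.mp hlen)
    subst this
    simp [pvALoop, pvSegment, pvDedupBlocks]
  | succ n ih =>
    intro xs seen hlen hinv
    match xs with
    | [] => simp [pvALoop, pvSegment, pvDedupBlocks]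
    | line :: rest =>
      have hrest : rest.length ≤ n := by
        simpa using Nat.lt_succ_iff.mp (Nat.lt_of_lt_of_le (by simp) hlen)
      by_cases hh : PySem.Str.isIn "Resource:" line = true
      · rw [pvSegment_none_cons_of_hdr line rest hh, pvSegment_some]
        by_cases hc : seen.contains line = true
        · -- duplicate header: both skip the block
          rw [pvALoop]
          rw [if_neg (by rw [hh, hc]; simp), if_pos hc, pvSkipCont_eq]
          rw [show pvDedupBlocks (((([line] ++ (pvTakeCont rest).1)) :: pvSegment (pvTakeCont rest).2 none)) seen
                = pvDedupBlocks (pvSegment (pvTakeCont rest).2 none) seen from by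
            simp only [List.cons_append, List.nil_append, pvDedupBlocks]
            rw [if_pos hc]]
          exact ih _ seen (le_trans (pvTakeCont_len rest) hrest) hinv
        · -- new header: both keep the whole block
          have hcf : seen.contains line = false := eq_false_of_ne_true hc
          rw [pvALoop]
          rw [if_pos (by rw [hh, hcf]; rfl)]
          have hinv' : ∀ s ∈ seen.add line, PySem.Str.isIn "Resource:" s = true := by
            intro s hs
            rcases (PySem.Set.mem_add seen line s).mp hs with h | h
            · exact hinv s h
            · subst h; exact hh
          rw [show pvDedupBlocks (((([line] ++ (pvTakeCont rest).1)) :: pvSegment (pvTakeCont rest).2 none)) seen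
                = line :: ((pvTakeCont rest).1 ++ pvDedupBlocks (pvSegment (pvTakeCont rest).2 none) (seen.add line)) from by
            simp only [List.cons_append, List.nil_append, pvDedupBlocks]
            rw [if_neg (by rw [hcf]; simp)]]
          show line :: ((pvTakeCont rest).1 ++ pvALoop (pvTakeCont rest).2 (seen.add line)) = _
          rw [ih _ (seen.add line) (le_trans (pvTakeCont_len rest) hrest) hinv']
      · -- non-header line before any open block: both drop it
        have hc : seen.contains line = false := by
          by_contra hcc
          exact hh (hinv line ((PySem.Set.contains_iff seen line).mp
            (Bool.not_eq_false _ |>.mp hcc)))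
        have hhf : PySem.Str.isIn "Resource:" line = false := eq_false_of_ne_true hh
        rw [pvALoop]
        rw [if_neg (by rw [hhf]; simp), if_neg (by rw [hc]; simp)]
        rw [pvSegment_none_cons_of_not_hdr line rest hh]
        exact ih rest seen hrest hinv

-- ===== VERDICT (by name: the statement is the Claim_ definition above) =====
theorem deduplicate_resources_spec : Claim_equal_deduplicate_resources := by
  intro resources _
  unfold Spec_deduplicate_resources deduplicate_resources deduplicate_resources_alt
  exact pv_main _ _ PySem.Set.empty le_rfl (by intro s hs; cases hs)
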